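-- pv_equiv track=rewrite | github.com/rlin25/TerminusDirectory | src/infrastructure/streaming/real_time_aggregator.py | _dimensions_match
-- ===== SOURCE A (Python) =====
-- from typing import Dict, List, Optional, Any, Set
--
-- def _dimensions_match(
--
--     data_dimensions: Dict[str, str],
--     filter_dimensions: Dict[str, str]
-- ) -> bool:
--     """Check if data dimensions match filter dimensions."""
--     for key, value in filter_dimensions.items():
--         if data_dimensions.get(key) != value:
--             return False
--     return True
-- ===== SOURCE B (Python) =====
-- def _dimensions_match(
--     data_dimensions,
--     filter_dimensions
-- ) -> bool:
--     """Check if data dimensions match filter dimensions."""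
--     matched = 0
--     for key, value in data_dimensions.items():
--         if filter_dimensions.get(key) == value:
--             matched += 1
--     return matched == len(filter_dimensions)
-- ===== Notes on version B (the rewrite author's own statement) =====
-- stated objective: alternative
-- what changed: Instead of looping over the filter with early return and a lookup into data, B traverses the other dict: it scans data_dimensions once, counts the entries the filter accepts, and compares that count to len(filter_dimensions) (valid since dict keys are unique).
import Mathlib
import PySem

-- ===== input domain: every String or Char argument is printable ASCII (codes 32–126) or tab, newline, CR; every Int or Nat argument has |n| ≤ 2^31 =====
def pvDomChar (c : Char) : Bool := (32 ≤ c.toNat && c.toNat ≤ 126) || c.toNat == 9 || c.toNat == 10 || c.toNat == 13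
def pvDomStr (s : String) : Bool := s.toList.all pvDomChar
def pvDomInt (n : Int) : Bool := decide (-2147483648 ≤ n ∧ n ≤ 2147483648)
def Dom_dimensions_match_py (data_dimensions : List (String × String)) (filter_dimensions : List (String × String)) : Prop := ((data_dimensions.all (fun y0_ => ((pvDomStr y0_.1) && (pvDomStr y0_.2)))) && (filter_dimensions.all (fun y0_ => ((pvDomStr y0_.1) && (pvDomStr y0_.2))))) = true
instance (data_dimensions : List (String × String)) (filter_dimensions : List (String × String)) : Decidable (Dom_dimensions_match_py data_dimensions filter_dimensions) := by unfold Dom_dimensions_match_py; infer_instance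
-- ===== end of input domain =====

-- B scans the OTHER dict: one pass over data_dimensions with a match counter,
-- compared at the end against len(filter_dimensions) — alternative algorithm, same cost.

-- ===== PORT A =====
-- dict.get(key): first match in the association list (both ports call it)
def pyDictGet (d : List (String × String)) (k : String) : Option String :=
  match d with
  | [] => none
  | (k', v) :: rest => if k' == k then some v else pyDictGet rest k

def dimensions_match_py (data_dimensions : List (String × String)) (filter_dimensions : List (String × String)) : Bool :=
  match filter_dimensions with
  | [] => true
  | (key, value) :: rest =>
    if pyDictGet data_dimensions key ≠ some value then false
    else dimensions_match_py data_dimensions rest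

-- ===== PORT B =====
-- matched = 0; for key, value in data: if filter.get(key) == value: matched += 1; return matched == len(filter)
def dimensions_match_py_alt (data_dimensions : List (String × String)) (filter_dimensions : List (String × String)) : Bool :=
  (data_dimensions.foldl
    (fun matched kv =>
      if pyDictGet filter_dimensions kv.1 == some kv.2 then matched + 1 else matched)
    0) == filter_dimensions.length

-- ===== PRECONDITION & SPEC =====
-- Pre_ restricts both arguments to association lists with pairwise-distinct keys:
-- only those represent Python dicts (A's real input types); it excludes no input
-- the Python A accepts.
def Pre_dimensions_match_py (data_dimensions : List (String × String)) (filter_dimensions : List (String × String)) : Prop :=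
  (data_dimensions.map Prod.fst).Nodup ∧ (filter_dimensions.map Prod.fst).Nodup

instance (data_dimensions : List (String × String)) (filter_dimensions : List (String × String)) : Decidable (Pre_dimensions_match_py data_dimensions filter_dimensions) := by unfold Pre_dimensions_match_py; infer_instance

def pvWitness_dimensions_match_py : (List (String × String)) × (List (String × String)) :=
  ([("a", "1"), ("b", "2")], [("b", "2")])

def Spec_dimensions_match_py (data_dimensions : List (String × String)) (filter_dimensions : List (String × String)) (out : Bool) : Prop := out = dimensions_match_py_alt data_dimensions filter_dimensions
instance (data_dimensions : List (String × String)) (filter_dimensions : List (String × String)) (out : Bool) : Decidable (Spec_dimensions_match_py data_dimensions filter_dimensions out) := by unfold Spec_dimensions_match_py; infer_instance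

-- ===== CLAIM (what is proved, stated in full; the proofs are below) =====
def Claim_equal_dimensions_match_py : Prop := ∀ (data_dimensions : List (String × String)) (filter_dimensions : List (String × String)), Dom_dimensions_match_py data_dimensions filter_dimensions → Pre_dimensions_match_py data_dimensions filter_dimensions → Spec_dimensions_match_py data_dimensions filter_dimensions (dimensions_match_py data_dimensions filter_dimensions)

-- ===== LEMMAS AND PROOFS =====
theorem pyDictGet_eq_some_iff_mem (d : List (String × String)) (k : String) (v : String)
    (h : (d.map Prod.fst).Nodup) : pyDictGet d k = some v ↔ (k, v) ∈ d := by
  induction d with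
  | nil => simp [pyDictGet]
  | cons p rest ih =>
    obtain ⟨k', v'⟩ := p
    simp only [List.map_cons, List.nodup_cons] at h
    by_cases hk : k' = k
    · subst hk
      simp only [pyDictGet, beq_self_eq_true, if_true, List.mem_cons]
      constructor
      · rintro hv; left; cases hv; rfl
      · rintro (hv | hv)
        · cases hv; rfl
        · exact absurd (List.mem_map.mpr ⟨(k', v), hv, rfl⟩) h.1
    · simp only [pyDictGet, beq_iff_eq, if_neg hk, List.mem_cons]
      rw [ih h.2]
      constructor
      · exact Or.inr
      · rintro (hv | hv)
        · cases hv; exact absurd rfl hk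
        · exact hv

theorem A_true_iff (d f : List (String × String)) :
    dimensions_match_py d f = true ↔ ∀ kv ∈ f, pyDictGet d kv.1 = some kv.2 := by
  induction f with
  | nil => simp [dimensions_match_py]
  | cons kv rest ih =>
    obtain ⟨k, v⟩ := kv
    by_cases h : pyDictGet d k = some v
    · simp [dimensions_match_py, h, ih]
    · simp [dimensions_match_py, h]

-- the counting foldl counts the filtered entries
theorem foldl_count (p : String × String → Bool) (l : List (String × String)) (n : Nat) :
    l.foldl (fun matched kv => if p kv then matched + 1 else matched) n
      = n + (l.filter p).length := by
  induction l generalizing n with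
  | nil => simp
  | cons kv rest ih =>
    by_cases h : p kv
    · simp [List.foldl, h, ih]; omega
    · simp [List.foldl, h, ih]

theorem dimensions_match_eq_alt (d f : List (String × String))
    (hd : (d.map Prod.fst).Nodup) (hf : (f.map Prod.fst).Nodup) :
    dimensions_match_py d f = dimensions_match_py_alt d f := by
  have hdn : d.Nodup := hd.of_map
  have hfn : f.Nodup := hf.of_map
  -- B's counter counts the d-entries lying in f, which biject with the f-entries lying in d
  have hcount : d.foldl
      (fun matched kv => if pyDictGet f kv.1 == some kv.2 then matched + 1 else matched) 0
      = (f.filter (fun kv => decide (kv ∈ d))).length := by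
    rw [foldl_count, Nat.zero_add]
    have h1 : d.filter (fun kv => pyDictGet f kv.1 == some kv.2)
        = d.filter (fun kv => decide (kv ∈ f)) := by
      apply List.filter_congr
      intro kv _
      rw [Bool.eq_iff_iff, beq_iff_eq, decide_eq_true_eq]
      exact pyDictGet_eq_some_iff_mem f kv.1 kv.2 hf
    rw [h1]
    have hperm : (d.filter (fun kv => decide (kv ∈ f))).Perm
        (f.filter (fun kv => decide (kv ∈ d))) := by
      rw [List.perm_ext_iff_of_nodup (hdn.filter _) (hfn.filter _)]
      intro x
      simp only [List.mem_filter, decide_eq_true_eq]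
      exact ⟨fun ⟨a, b⟩ => ⟨b, a⟩, fun ⟨a, b⟩ => ⟨b, a⟩⟩
    exact hperm.length_eq
  have hB : dimensions_match_py_alt d f
      = ((f.filter (fun kv => decide (kv ∈ d))).length == f.length) := by
    unfold dimensions_match_py_alt
    rw [hcount]
  -- both sides are "every f-entry lies in d"
  rw [Bool.eq_iff_iff, A_true_iff, hB, beq_iff_eq]
  constructor
  · intro h
    have : f.filter (fun kv => decide (kv ∈ d)) = f :=
      List.filter_eq_self.mpr (fun kv hm => by
        simpa using (pyDictGet_eq_some_iff_mem d kv.1 kv.2 hd).mp (h kv hm))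
    rw [this]
  · intro h kv hm
    have hall : ∀ x ∈ f, decide (x ∈ d) = true := by
      by_contra hc
      push Not at hc
      have hlt : (f.filter (fun kv => decide (kv ∈ d))).length < f.length := by
        apply List.length_filter_lt_length_iff_exists.mpr
        obtain ⟨x, hx, hnx⟩ := hc
        exact ⟨x, hx, hnx⟩
      omega
    exact (pyDictGet_eq_some_iff_mem d kv.1 kv.2 hd).mpr (by simpa using hall kv hm)

-- ===== VERDICT (by name: the statement is the Claim_ definition above) =====
theorem dimensions_match_py_spec : Claim_equal_dimensions_match_py := by
  intro d f _ hpre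
  exact dimensions_match_eq_alt d f hpre.1 hpre.2
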